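-- pv_equiv track=rewrite | github.com/aniruddhavpatil/map_reduce | Master.py | red_func
-- ===== SOURCE A (Python) =====
-- def red_func(tuple_data):
--     D = {}
--     for k, v in tuple_data:
--         if k not in D:
--             D[k]=1
--         else:
--             D[k]+=1
--     return tuple(list(zip(D.keys(), D.values())))
-- ===== SOURCE B (Python) =====
-- def red_func(tuple_data):
--     # B: recursive partition on the key list: take the first key, count its
--     # occurrences by filtering them all out, then recurse on the remainder.
--     def go(ks):
--         if not ks:
--             return []
--         k = ks[0]
--         rest = [x for x in ks[1:] if x != k]
--         return [(k, len(ks) - len(rest))] + go(rest)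
--     return tuple(go([k for k, _ in tuple_data]))
-- ===== Notes on version B (the rewrite author's own statement) =====
-- stated objective: alternative
-- what changed: Replaces the single-pass dict accumulator with a quicksort-style recursive partition: take the first key, derive its count from the length drop after filtering out all its occurrences, and recurse on the filtered remainder.
import Mathlib
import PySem

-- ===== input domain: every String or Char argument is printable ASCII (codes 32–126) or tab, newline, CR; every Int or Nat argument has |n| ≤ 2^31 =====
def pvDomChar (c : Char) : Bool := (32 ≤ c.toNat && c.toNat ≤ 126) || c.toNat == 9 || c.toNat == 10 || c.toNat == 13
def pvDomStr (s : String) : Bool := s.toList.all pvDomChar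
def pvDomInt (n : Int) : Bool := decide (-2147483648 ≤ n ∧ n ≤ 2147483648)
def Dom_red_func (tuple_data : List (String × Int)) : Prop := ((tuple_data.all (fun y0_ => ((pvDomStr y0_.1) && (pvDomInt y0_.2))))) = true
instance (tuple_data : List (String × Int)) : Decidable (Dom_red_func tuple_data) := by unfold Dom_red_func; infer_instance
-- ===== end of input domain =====

-- B replaces A's single-pass dict accumulator by a recursive partition on the key list
-- (count the first key via the length drop of filtering it out, recurse on the rest);
-- an alternative decomposition with the same results.
-- ===== PORT A =====
def red_func (tuple_data : List (String × Int)) : List (String × Int) :=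
  (tuple_data.foldl
    (fun D p => if D.contains p.1 then D.insert p.1 (D.getD p.1 0 + 1) else D.insert p.1 1)
    PySem.Dict.empty).items

-- ===== PORT B =====
def redGo : List String → List (String × Int)
  | [] => []
  | k :: ks =>
    let rest := ks.filter (fun x => x != k)
    (k, ((k :: ks).length : Int) - rest.length) :: redGo rest
termination_by ks => ks.length
decreasing_by simpa using Nat.lt_succ_of_le (List.length_filter_le _ _)

def red_func_alt (tuple_data : List (String × Int)) : List (String × Int) :=
  redGo (tuple_data.map (fun p => p.1))

-- ===== PRECONDITION & SPEC =====
def Spec_red_func (tuple_data : List (String × Int)) (out : List (String × Int)) : Prop := out = red_func_alt tuple_data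
instance (tuple_data : List (String × Int)) (out : List (String × Int)) : Decidable (Spec_red_func tuple_data out) := by unfold Spec_red_func; infer_instance

-- ===== CLAIM =====
def Claim_equal_red_func : Prop := ∀ (tuple_data : List (String × Int)), Dom_red_func tuple_data → Spec_red_func tuple_data (red_func tuple_data)

-- ===== LEMMAS AND PROOFS =====

-- set(filter p xs) = filter p (set(xs)) (first-occurrence dedup commutes with filter)
theorem ofList_filter {α : Type} [BEq α] [LawfulBEq α] (p : α → Bool) (xs : List α) :
    PySem.Set.ofList (xs.filter p) = (PySem.Set.ofList xs).filter p := by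
  induction xs with
  | nil => rfl
  | cons x xs ih =>
    by_cases hp : p x
    · simp only [List.filter_cons, hp, if_true, PySem.Set.ofList_cons, PySem.Set.discard,
        ih, List.filter_filter]
      congr 1
      apply List.filter_congr
      intro a _
      simp [Bool.and_comm]
    · simp only [Bool.not_eq_true] at hp
      simp only [List.filter_cons, hp, PySem.Set.ofList_cons, PySem.Set.discard, ih,
        List.filter_filter, Bool.false_eq_true, if_false]
      apply List.filter_congr
      intro a _
      by_cases hax : a = x
      · subst hax; simp [hp]
      · simp [hax]

theorem redGo_eq_map_count (ks : List String) :
    redGo ks = (PySem.Set.ofList ks).map (fun k => (k, (ks.count k : Int))) := by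
  induction ks using redGo.induct with
  | case1 => simp [redGo]
  | case2 k ks rest ih =>
    simp only [rest, List.unattach_filter, List.unattach_attach] at ih
    clear_value rest
    rw [redGo, PySem.Set.ofList_cons, List.map_cons]
    have hset : PySem.Set.ofList (ks.filter (fun x => x != k))
        = (PySem.Set.ofList ks).discard k := by
      rw [ofList_filter]; simp [PySem.Set.discard, bne]
    congr 1
    · -- head pair
      congr 1
      have hlen : (ks.filter (fun x => x != k)).length + ks.countP (fun x => x == k)
          = ks.length := by
        have h := List.length_eq_countP_add_countP (fun x => x == k) (l := ks)
        rw [← List.countP_eq_length_filter]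
        have : ks.countP (fun x => x != k)
            = ks.countP (fun a => decide ¬(a == k) = true) := by
          apply List.countP_congr; intro a _; simp [bne]
        omega
      have hcount : (k :: ks).count k = ks.countP (fun x => x == k) + 1 := by
        simp [List.count]
      rw [hcount]
      simp only [List.length_cons]
      push_cast
      omega
    · -- tail
      rw [ih, hset]
      apply List.map_congr_left
      intro a ha
      have hak : a ≠ k := by
        simp only [PySem.Set.discard, List.mem_filter, Bool.not_eq_eq_eq_not,
          Bool.not_true, beq_eq_false_iff_ne] at ha
        exact ha.2
      congr 1
      have h1 : (ks.filter (fun x => x != k)).count a = ks.count a :=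
        List.count_filter (by simp [hak])
      rw [h1, List.count_cons]
      simp [Ne.symm hak]

-- ===== VERDICT =====
theorem red_func_spec : Claim_equal_red_func := by
  intro td _
  unfold Spec_red_func red_func red_func_alt
  have h1 : List.foldl
      (fun (D : PySem.Dict String Int) (p : String × Int) =>
        if D.contains p.1 then D.insert p.1 (D.getD p.1 0 + 1) else D.insert p.1 1)
      PySem.Dict.empty td
      = List.foldl (fun D p => D.insert p.1 (D.getD p.1 0 + 1)) PySem.Dict.empty td := by
    apply PySem.List.foldl_congr_mem
    intro D p _
    by_cases h : D.contains p.1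
    · simp [h]
    · simp only [Bool.not_eq_true] at h
      simp [h, PySem.Dict.getD_of_not_contains D 0 h]
  rw [h1, ← List.foldl_map (f := fun (p : String × Int) => p.1)
        (g := fun (D : PySem.Dict String Int) k => D.insert k (D.getD k 0 + 1)),
      PySem.Dict.foldl_insert_getD_add_one_eq_counter, PySem.Dict.items_counter,
      redGo_eq_map_count]
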